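-- pv_equiv track=rewrite | github.com/eigu47/aoc | 2022/days/day06.py | day_06_2
-- ===== SOURCE A (Python) =====
-- def day_06_2(input: str) -> int:
--     ans = 0
--
--     # sliding window implementation
--     seen = {}
--     left = 0
--     for right, char in enumerate(input):
--         if char in seen and seen[char] >= left:
--             if seen[char] == left:
--                 pass
--             left = seen[char] + 1
--
--         seen[char] = right
--
--         if right - left + 1 >= 14:
--             return right + 1
--
--     return ans
-- ===== SOURCE B (Python) =====
-- def day_06_2(input: str) -> int:
--     for i in range(13, len(input)):
--         if len(set(input[i - 13:i + 1])) == 14: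
--             return i + 1
--     return 0
-- ===== Notes on version B (the rewrite author's own statement) =====
-- stated objective: simpler
-- what changed: Replaces the sliding-window state (last-seen dict plus left pointer) by a direct scan that rebuilds the 14-character window set at each position and returns the first index whose set has 14 elements.
import Mathlib
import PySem

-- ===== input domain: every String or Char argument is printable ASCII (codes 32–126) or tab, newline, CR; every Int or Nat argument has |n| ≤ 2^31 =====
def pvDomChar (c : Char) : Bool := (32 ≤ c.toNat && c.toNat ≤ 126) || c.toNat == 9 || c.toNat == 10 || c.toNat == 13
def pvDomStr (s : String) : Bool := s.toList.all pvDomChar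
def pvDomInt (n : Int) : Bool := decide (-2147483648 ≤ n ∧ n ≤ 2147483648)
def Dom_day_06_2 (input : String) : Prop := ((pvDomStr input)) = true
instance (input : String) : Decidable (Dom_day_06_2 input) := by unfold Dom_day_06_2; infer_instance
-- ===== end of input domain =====

-- B replaces A's sliding-window state (last-seen dict + left pointer) by a direct scan
-- that rebuilds the 14-char window set at each position; objective: simpler.

-- ===== PORT A =====
-- the enumerate loop with early return, as structural recursion over the remaining chars
def pvALoop (rest : List Char) (right : Int) (seen : PySem.Dict Char Int) (left : Int) : Int :=
  match rest with
  | [] => 0  -- ans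
  | char :: rest' =>
    let left' : Int :=
      match seen.get? char with
      | some k => if k ≥ left then k + 1 else left
      | none => left
    let seen' := seen.insert char right
    if right - left' + 1 ≥ 14 then right + 1
    else pvALoop rest' (right + 1) seen' left'

def day_06_2 (input : String) : Int :=
  pvALoop input.toList 0 PySem.Dict.empty 0

-- ===== PORT B =====
-- the 'for i in range(13, len(input))' loop with early return
def pvBLoop (cs : List Char) (i : Nat) : Int :=
  if _h : i < cs.length then
    if (PySem.Set.ofList (PySem.List.slice cs (some ((i : Int) - 13)) (some ((i : Int) + 1)))).length = 14
    then (i : Int) + 1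
    else pvBLoop cs (i + 1)
  else 0
termination_by cs.length - i

def day_06_2_alt (input : String) : Int :=
  pvBLoop input.toList 13

-- ===== PRECONDITION & SPEC =====
def Spec_day_06_2 (input : String) (out : Int) : Prop := out = day_06_2_alt input
instance (input : String) (out : Int) : Decidable (Spec_day_06_2 input out) := by unfold Spec_day_06_2; infer_instance

-- ===== CLAIM (what is proved, stated in full; the proofs are below) =====
def Claim_equal_day_06_2 : Prop := ∀ (input : String), Dom_day_06_2 input → Spec_day_06_2 input (day_06_2 input)

-- ===== LEMMAS AND PROOFS =====

-- seen maps each char of the processed prefix p to its last index there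
def pvSeenInv (p : List Char) (seen : PySem.Dict Char Int) : Prop :=
  ∀ c : Char,
    match seen.get? c with
    | none => c ∉ p
    | some k => ∃ j : Nat, k = (j : Int) ∧ j < p.length ∧ p[j]? = some c ∧
        ∀ m : Nat, j < m → m < p.length → p[m]? ≠ some c

-- left is the least start of a duplicate-free suffix of the processed prefix p
def pvLeftInv (p : List Char) (left : Int) : Prop :=
  ∃ l : Nat, left = (l : Int) ∧ l ≤ p.length ∧ (p.drop l).Nodup ∧
    ∀ m : Nat, m < l → ¬ (p.drop m).Nodup

theorem pv_mem_drop_iff {p : List Char} {t : Nat} {c : Char} :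
    c ∈ p.drop t ↔ ∃ m : Nat, t ≤ m ∧ m < p.length ∧ p[m]? = some c := by
  rw [List.mem_iff_getElem?]
  constructor
  · rintro ⟨i, hi⟩
    rw [List.getElem?_drop] at hi
    obtain ⟨hlt, -⟩ := List.getElem?_eq_some_iff.mp hi
    exact ⟨t + i, by omega, hlt, hi⟩
  · rintro ⟨m, h1, h2, h3⟩
    exact ⟨m - t, by rw [List.getElem?_drop]; rwa [Nat.add_sub_cancel' h1]⟩

theorem pv_nodup_concat {x : List Char} {c : Char} : (x ++ [c]).Nodup ↔ x.Nodup ∧ c ∉ x := by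
  simp [List.nodup_append]
  intro _
  constructor
  · intro h hc; exact h c hc rfl
  · intro h a ha heq; exact h (heq ▸ ha)

theorem pv_drop_concat {p : List Char} {c : Char} {m : Nat} (h : m ≤ p.length) :
    (p ++ [c]).drop m = p.drop m ++ [c] :=
  List.drop_append_of_le_length h

theorem pv_seen_step (p : List Char) (seen : PySem.Dict Char Int) (c : Char)
    (h : pvSeenInv p seen) : pvSeenInv (p ++ [c]) (seen.insert c (p.length : Int)) := by
  intro c'
  rw [PySem.Dict.get?_insert]
  by_cases hc : c' = c
  · subst hc
    rw [if_pos rfl]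
    refine ⟨p.length, rfl, by simp, by simp, fun m hm hm2 => by simp at hm2; omega⟩
  · rw [if_neg hc]
    have hold := h c'
    cases hg : seen.get? c' with
    | none =>
        rw [hg] at hold
        simp only []
        simp [hold, hc]
    | some k =>
        rw [hg] at hold
        obtain ⟨j, hk, hj, hget, hmax⟩ := hold
        refine ⟨j, hk, by simp; omega, ?_, ?_⟩
        · rwa [List.getElem?_append_left hj]
        · intro m hm1 hm2
          simp only [List.length_append, List.length_singleton] at hm2
          by_cases hmp : m < p.length
          · rw [List.getElem?_append_left hmp]; exact hmax m hm1 hmp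
          · have : m = p.length := by omega
            subst this
            simp
            intro hEq
            exact hc hEq.symm

theorem pv_left_step (p : List Char) (seen : PySem.Dict Char Int) (c : Char) (left : Int)
    (hs : pvSeenInv p seen) (hl : pvLeftInv p left) :
    pvLeftInv (p ++ [c])
      (match seen.get? c with
       | some k => if k ≥ left then k + 1 else left
       | none => left) := by
  obtain ⟨l, rfl, hlen, hnd, hmin⟩ := hl
  have hsc := hs c
  have minlift : ∀ m : Nat, m < l → ¬ ((p ++ [c]).drop m).Nodup := by
    intro m hm hndm
    rw [pv_drop_concat (by omega)] at hndm
    exact hmin m hm (pv_nodup_concat.mp hndm).1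
  cases hg : seen.get? c with
  | none =>
      rw [hg] at hsc
      simp only []
      refine ⟨l, rfl, by simp; omega, ?_, minlift⟩
      rw [pv_drop_concat hlen, pv_nodup_concat]
      exact ⟨hnd, fun hmem => hsc (List.mem_of_mem_drop hmem)⟩
  | some k =>
      rw [hg] at hsc
      obtain ⟨j, rfl, hj, hget, hmax⟩ := hsc
      simp only []
      by_cases hge : (j : Int) ≥ (l : Int)
      · rw [if_pos hge]
        have hjl : l ≤ j := by exact_mod_cast hge
        refine ⟨j + 1, by push_cast; ring, by simp; omega, ?_, ?_⟩
        · rw [pv_drop_concat (by omega), pv_nodup_concat]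
          constructor
          · exact hnd.sublist (by
              have : p.drop (j+1) = (p.drop l).drop (j+1-l) := by
                rw [List.drop_drop]; congr 1; omega
              rw [this]; exact List.drop_sublist _ _)
          · intro hmem
            obtain ⟨m, hm1, hm2, hm3⟩ := pv_mem_drop_iff.mp hmem
            exact hmax m (by omega) hm2 hm3
        · intro m hm
          by_cases hml : m < l
          · exact minlift m hml
          · intro hndm
            rw [pv_drop_concat (by omega)] at hndm
            have hcm : c ∈ p.drop m := pv_mem_drop_iff.mpr ⟨j, by omega, hj, hget⟩
            exact (pv_nodup_concat.mp hndm).2 hcm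
      · rw [if_neg hge]
        have hjl : j < l := by omega
        refine ⟨l, rfl, by simp; omega, ?_, minlift⟩
        rw [pv_drop_concat hlen, pv_nodup_concat]
        refine ⟨hnd, fun hmem => ?_⟩
        obtain ⟨m, hm1, hm2, hm3⟩ := pv_mem_drop_iff.mp hmem
        exact hmax m (by omega) hm2 hm3

theorem pv_foldl_add_sublist {α : Type} [DecidableEq α] (xs s : List α) :
    ∃ t, t.Sublist xs ∧ xs.foldl PySem.Set.add s = s ++ t := by
  induction xs generalizing s with
  | nil => exact ⟨[], List.Sublist.refl _, by simp⟩
  | cons x xs ih =>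
    simp only [List.foldl_cons]
    by_cases hx : x ∈ s
    · have : PySem.Set.add s x = s := by simp [PySem.Set.add, PySem.Set.contains, hx]
      rw [this]
      obtain ⟨t, ht, he⟩ := ih s
      exact ⟨t, ht.cons _, he⟩
    · have : PySem.Set.add s x = s ++ [x] := by simp [PySem.Set.add, PySem.Set.contains, hx]
      rw [this]
      obtain ⟨t, ht, he⟩ := ih (s ++ [x])
      exact ⟨x :: t, ht.cons₂ _, by simp [he]⟩

theorem pv_ofList_sublist {α : Type} [DecidableEq α] (w : List α) :
    (PySem.Set.ofList w).Sublist w := by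
  obtain ⟨t, ht, he⟩ := pv_foldl_add_sublist w ([] : List α)
  rw [PySem.Set.ofList_eq_foldl, he]
  simpa using ht

-- set(w) has 14 elements iff the 14-char window w has no repeated char
theorem pv_set_len_iff (w : List Char) (hw : w.length = 14) :
    (PySem.Set.ofList w).length = 14 ↔ w.Nodup := by
  constructor
  · intro h
    have := (pv_ofList_sublist w).eq_of_length (by omega)
    rw [← this]
    exact PySem.Set.nodup_ofList w
  · intro h
    rw [PySem.Set.ofList_eq_self_of_nodup w h, hw]

-- B's window slice at position p.length, inside cs = (p ++ [c]) ++ rest'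
theorem pv_slice_window (p rest' : List Char) (c : Char) (hr : 13 ≤ p.length) :
    PySem.List.slice ((p ++ [c]) ++ rest') (some ((p.length : Int) - 13)) (some ((p.length : Int) + 1))
      = (p ++ [c]).drop (p.length - 13) := by
  have h1 : (p.length : Int) - 13 = ((p.length - 13 : Nat) : Int) := by omega
  have h2 : (p.length : Int) + 1 = ((p.length + 1 : Nat) : Int) := by omega
  rw [h1, h2, PySem.List.slice_natCast]
  have h3 : p.length + 1 - (p.length - 13) = 14 := by omega
  rw [h3]
  rw [List.drop_append_of_le_length (by simp; omega)]
  exact List.take_left' (by simp; omega)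

theorem pv_window_len (p : List Char) (c : Char) (hr : 13 ≤ p.length) :
    ((p ++ [c]).drop (p.length - 13)).length = 14 := by
  simp [List.length_drop]; omega

-- A's window check r - left' + 1 >= 14 holds iff the last 14 chars are distinct
theorem pv_cond_iff (p : List Char) (c : Char) (left' : Int)
    (hl : pvLeftInv (p ++ [c]) left') :
    ((p.length : Int) - left' + 1 ≥ 14) ↔ (13 ≤ p.length ∧ ((p ++ [c]).drop (p.length - 13)).Nodup) := by
  obtain ⟨l, rfl, hlen, hnd, hmin⟩ := hl
  constructor
  · intro h
    have h13 : l + 13 ≤ p.length := by omega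
    refine ⟨by omega, ?_⟩
    refine hnd.sublist ?_
    have : (p ++ [c]).drop (p.length - 13) = ((p ++ [c]).drop l).drop (p.length - 13 - l) := by
      rw [List.drop_drop]; congr 1; omega
    rw [this]
    exact List.drop_sublist _ _
  · rintro ⟨h13, hndw⟩
    have : ¬ (p.length - 13 < l) := fun hc => hmin _ hc hndw
    omega

theorem pv_main (rest : List Char) : ∀ (p : List Char) (seen : PySem.Dict Char Int) (left : Int),
    pvSeenInv p seen → pvLeftInv p left →
    pvALoop rest (p.length : Int) seen left = pvBLoop (p ++ rest) (max p.length 13) := by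
  induction rest with
  | nil =>
      intro p seen left _ _
      rw [pvALoop, pvBLoop]
      rw [dif_neg (by simp)]
  | cons c rest' ih =>
      intro p seen left hs hl
      have hs' := pv_seen_step p seen c hs
      have hl' := pv_left_step p seen c left hs hl
      have hcs : p ++ c :: rest' = (p ++ [c]) ++ rest' := by simp
      have hlt : p.length < ((p ++ [c]) ++ rest').length := by
        simp only [List.length_append, List.length_cons, List.length_nil]; omega
      rw [hcs]
      simp only [pvALoop]
      by_cases hcond : (p.length : Int) -
          (match seen.get? c with
           | some k => if k ≥ left then k + 1 else left
           | none => left) + 1 ≥ 14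
      · obtain ⟨h13, hndw⟩ := (pv_cond_iff p c _ hl').mp hcond
        rw [if_pos hcond, Nat.max_eq_left h13]
        conv_rhs => rw [pvBLoop]
        rw [dif_pos hlt]
        rw [pv_slice_window p rest' c h13,
            if_pos ((pv_set_len_iff _ (pv_window_len p c h13)).mpr hndw)]
      · rw [if_neg hcond]
        have hplen : (p ++ [c]).length = p.length + 1 := by simp
        have hIH := ih (p ++ [c]) (seen.insert c (p.length : Int)) _ hs' hl'
        rw [hplen] at hIH
        push_cast at hIH
        rw [hIH]
        have hnnodw : ¬ (13 ≤ p.length ∧ ((p ++ [c]).drop (p.length - 13)).Nodup) :=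
          fun hx => hcond ((pv_cond_iff p c _ hl').mpr hx)
        by_cases h13 : 13 ≤ p.length
        · rw [Nat.max_eq_left (by omega), Nat.max_eq_left h13]
          conv_rhs => rw [pvBLoop]
          rw [dif_pos hlt]
          rw [pv_slice_window p rest' c h13]
          rw [if_neg (fun hset => hnnodw ⟨h13, (pv_set_len_iff _ (pv_window_len p c h13)).mp hset⟩)]
        · rw [Nat.max_eq_right (by omega), Nat.max_eq_right (by omega)]

-- ===== VERDICT (by name: the statement is the Claim_ definition above) =====
theorem day_06_2_spec : Claim_equal_day_06_2 := by
  intro input _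
  unfold Spec_day_06_2 day_06_2 day_06_2_alt
  have h := pv_main input.toList [] PySem.Dict.empty 0
    (by intro c; simp [PySem.Dict.get?_empty])
    ⟨0, by simp⟩
  simpa using h
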